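-- pv_equiv track=rewrite | github.com/Yoonyesol/CodingTest | [프로그래머스] 코딩 기초 트레이닝_코드 처리하기.py | solution
-- ===== SOURCE A (Python) =====
-- def solution(code):
--     ret = ''    #반환할 문자열
--     mode = 0    #모드(초기값 0)
--     for idx in range(len(code)):
--         if mode == 1:   #모드가 1일 때
--             if code[idx] == "1":    #문자가 "1"이면
--                 mode = 0    #모드를 0으로 바꾼다.
--             else:   #문자가 "1"이 아니면
--                 if idx % 2 != 0:    #idx가 홀수일 때만
--                     ret += code[idx]    #ret의 맨 뒤에 code[idx]를 추가
--         elif mode == 0:   #모드가 0일 때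
--             if code[idx] == "1":    #문자가 "1"이면
--                 mode = 1    #모드를 1로 바꾼다.
--             else:   #문자가 "1"이 아니면
--                 if idx % 2 == 0:    #idx가 짝수일 때만
--                     ret += code[idx]    #ret의 맨 뒤에 code[idx]를 추가
--     if ret == "": return "EMPTY"    #return하려는 ret가 빈 문자열이라면 "EMPTY" return
--     else: return ret    #빈문자열 아니라면 ret return
-- ===== SOURCE B (Python) =====
-- def solution(code):
--     # First pass: prefix count of '1's; mode at position i is pref[i] % 2.
--     pref = [0]
--     for c in code:
--         pref.append(pref[-1] + (c == '1'))
--     # Second pass: keep code[i] when it's not '1' and mode parity matches index parity.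
--     out = ''.join(c for i, (p, c) in enumerate(zip(pref, code)) if c != '1' and p % 2 == i % 2)
--     return out or 'EMPTY'
-- ===== Notes on version B (the rewrite author's own statement) =====
-- stated objective: alternative
-- what changed: Replaces A's single toggling mode state machine with a two-pass scheme: first build a prefix '1'-count table, then filter characters whose prefix parity matches their index parity and join.
import Mathlib
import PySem

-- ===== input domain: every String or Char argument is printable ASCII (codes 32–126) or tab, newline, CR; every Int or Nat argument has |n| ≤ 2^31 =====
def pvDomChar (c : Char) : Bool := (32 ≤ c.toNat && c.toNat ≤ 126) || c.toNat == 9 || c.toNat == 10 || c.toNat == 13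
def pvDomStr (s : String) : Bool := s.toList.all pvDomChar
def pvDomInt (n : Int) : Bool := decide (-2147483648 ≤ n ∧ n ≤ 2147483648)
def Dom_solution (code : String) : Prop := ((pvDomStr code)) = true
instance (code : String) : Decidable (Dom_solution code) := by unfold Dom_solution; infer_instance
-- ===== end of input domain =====

-- B replaces A's single toggling state-machine scan by a prefix-count table built first
-- plus a separate parity-filtering pass (alternative decomposition, same cost).

-- ===== PORT A =====
-- A's loop over range(len(code)) with code[idx], carried as a fold over the indexed characters.
def solutionStepA (st : List Char × Int) (p : Char × Nat) : List Char × Int :=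
  let ret := st.1
  let mode := st.2
  let c := p.1
  let idx := p.2
  if mode = 1 then
    if c = '1' then (ret, 0)
    else if idx % 2 ≠ 0 then (ret ++ [c], mode) else (ret, mode)
  else if mode = 0 then
    if c = '1' then (ret, 1)
    else if idx % 2 = 0 then (ret ++ [c], mode) else (ret, mode)
  else (ret, mode)

def solution (code : String) : String :=
  let r := (code.toList.zipIdx).foldl solutionStepA ([], 0)
  if r.1 = [] then "EMPTY" else String.mk r.1

-- ===== PORT B =====
-- pref = running count of '1' characters (pref[i] = number of '1's in code[:i]).
def solution_alt (code : String) : String :=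
  let cs := code.toList
  let pref : List Nat := cs.scanl (fun a c => a + (if c = '1' then 1 else 0)) 0
  let kept : List Char :=
    (((pref.zip cs).zipIdx).filter (fun q => q.1.2 != '1' && q.1.1 % 2 == q.2 % 2)).map
      (fun q => q.1.2)
  if kept = [] then "EMPTY" else String.mk kept

-- ===== PRECONDITION & SPEC =====
def Spec_solution (code : String) (out : String) : Prop := out = solution_alt code
instance (code : String) (out : String) : Decidable (Spec_solution code out) := by unfold Spec_solution; infer_instance

-- ===== CLAIM (what is proved, stated in full; the proofs are below) =====
def Claim_equal_solution : Prop := ∀ (code : String), Dom_solution code → Spec_solution code (solution code)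

-- ===== LEMMAS AND PROOFS =====

-- Common characterisation: characters kept from t, starting at index i with m '1's seen so far.
def keepG : List Char → Nat → Nat → List Char
  | [], _, _ => []
  | c :: t, i, m =>
      if c = '1' then keepG t (i + 1) (m + 1)
      else if m % 2 = i % 2 then c :: keepG t (i + 1) m
      else keepG t (i + 1) m

theorem stepA_char (ret : List Char) (m : Nat) (c : Char) (i : Nat) :
    solutionStepA (ret, ((m % 2 : Nat) : Int)) (c, i) =
      (if c = '1' then (ret, (((m + 1) % 2 : Nat) : Int))
       else if m % 2 = i % 2 then (ret ++ [c], ((m % 2 : Nat) : Int))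
       else (ret, ((m % 2 : Nat) : Int))) := by
  rcases Nat.mod_two_eq_zero_or_one m with hm | hm <;>
    rcases Nat.mod_two_eq_zero_or_one i with hi | hi <;>
      by_cases hc : c = '1' <;>
        simp [solutionStepA, hc, hm, hi, Nat.add_mod]

theorem foldA_eq_keepG (t : List Char) (i : Nat) (ret : List Char) (m : Nat) :
    ((t.zipIdx i).foldl solutionStepA (ret, ((m % 2 : Nat) : Int))).1 = ret ++ keepG t i m := by
  induction t generalizing i ret m with
  | nil => simp [keepG]
  | cons c t ih =>
      simp only [List.zipIdx, List.foldl_cons]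
      rw [stepA_char]
      by_cases hc : c = '1'
      · rw [if_pos hc, ih]
        simp [keepG, hc]
      · rw [if_neg hc]
        by_cases hp : m % 2 = i % 2
        · rw [if_pos hp, ih]
          simp [keepG, hc, hp]
        · rw [if_neg hp, ih]
          simp [keepG, hc, hp]

theorem keptB_eq_keepG (t : List Char) (i : Nat) (a : Nat) :
    ((((List.scanl (fun a c => a + (if c = '1' then 1 else 0)) a t).zip t).zipIdx i).filter
        (fun q => q.1.2 != '1' && q.1.1 % 2 == q.2 % 2)).map (fun q => q.1.2)
      = keepG t i a := by
  induction t generalizing i a with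
  | nil => simp [keepG]
  | cons c t ih =>
      rw [List.scanl_cons]
      simp only [List.zip_cons_cons, List.zipIdx, List.filter_cons, keepG]
      by_cases hc : c = '1'
      · have ha : a + (if c = '1' then 1 else 0) = a + 1 := by simp [hc]
        rw [ha, if_neg (by simp [hc]), ih]
        simp [keepG, hc]
      · have ha : a + (if c = '1' then 1 else 0) = a := by simp [hc]
        rw [ha]
        by_cases hp : a % 2 = i % 2
        · have : ((c != '1') && (a % 2 == i % 2)) = true := by
            simp [hc, hp]
          rw [if_pos this, List.map_cons, ih]
          simp [hc, hp]
        · have : ¬ ((c != '1') && (a % 2 == i % 2)) = true := by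
            simp [hc, hp]
          rw [if_neg this, ih]
          simp [hc, hp]

-- ===== VERDICT (by name: the statement is the Claim_ definition above) =====
theorem solution_spec : Claim_equal_solution := by
  intro code _
  unfold Spec_solution solution solution_alt
  have hA := foldA_eq_keepG code.toList 0 [] 0
  simp only [List.nil_append] at hA
  have hB := keptB_eq_keepG code.toList 0 0
  simp only
  rw [show ((0 : Int)) = ((0 % 2 : Nat) : Int) by norm_num] at *
  rw [hA, hB]
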